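-- pv_equiv track=rewrite | github.com/revengenowstudio/devops | archived_issues_collector/src/output_changes.py | versionCodeToValue
-- ===== SOURCE A (Python) =====
-- def strToHex(strIn):
--     num = {
--         '0':0,
--         '1':1,
--         '2':2,
--         '3':3,
--         '4':4,
--         '5':5,
--         '6':6,
--         '7':7,
--         '8':8,
--         '9':9,
--         'a':10,
--         'b':11,
--     }
--     ret = 0
--     round = len(strIn) - 1
--     for ch in strIn:
--         ret += (num[ch] << (round * 4))
--         round -= 1
--     return ret
--
-- def versionCodeToValue(input):
--     if '.' in input:
--         verParts = input.split('.')
--         multiRound = len(verParts) - 1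
--         ret = 0
--         for part in verParts:
--             ret += strToHex(part) << 10 * multiRound
--             multiRound -= 1
--         return ret
--     raise ValueError
-- ===== SOURCE B (Python) =====
-- def versionCodeToValue(input):
--     if '.' in input:
--         num = {
--             '0': 0, '1': 1, '2': 2, '3': 3, '4': 4, '5': 5,
--             '6': 6, '7': 7, '8': 8, '9': 9, 'a': 10, 'b': 11,
--         }
--         ret = 0
--         for part in input.split('.'):
--             partVal = 0
--             for ch in part:
--                 partVal = partVal * 16 + num[ch]
--             ret = ret * 1024 + partVal
--         return ret
--     raise ValueError
-- ===== Notes on version B (the rewrite author's own statement) =====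
-- stated objective: simpler
-- what changed: Inlined the strToHex helper and replaced the two descending position-shift counters with Horner's method: one double loop folding partVal = partVal*16 + num[ch] and ret = ret*1024 + partVal.
import Mathlib
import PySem

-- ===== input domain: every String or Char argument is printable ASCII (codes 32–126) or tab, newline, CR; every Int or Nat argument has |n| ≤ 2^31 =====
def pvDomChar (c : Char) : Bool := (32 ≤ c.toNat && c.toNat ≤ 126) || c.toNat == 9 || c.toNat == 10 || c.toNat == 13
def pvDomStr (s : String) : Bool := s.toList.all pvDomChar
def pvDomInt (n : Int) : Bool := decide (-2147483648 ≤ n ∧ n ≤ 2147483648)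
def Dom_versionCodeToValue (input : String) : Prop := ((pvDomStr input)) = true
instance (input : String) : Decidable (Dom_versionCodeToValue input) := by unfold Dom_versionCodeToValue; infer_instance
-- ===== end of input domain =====

-- B inlines the strToHex helper and replaces the positional-shift sums with Horner's method (simpler decomposition; same cost).

-- ===== PORT A =====
-- the 0–b digit dict of both Pythons; a char outside it is a KeyError, excluded by Pre_ (the 0 default is unreachable under Pre_).
def numA (ch : Char) : Int :=
  match ch with
  | '0' => 0 | '1' => 1 | '2' => 2 | '3' => 3 | '4' => 4 | '5' => 5
  | '6' => 6 | '7' => 7 | '8' => 8 | '9' => 9 | 'a' => 10 | 'b' => 11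
  | _ => 0

def strToHexPort (s : String) : Int :=
  (s.toList.foldl
    (fun (st : Int × Int) ch => (st.1 + numA ch * (2:Int) ^ (st.2 * 4).toNat, st.2 - 1))
    (0, (s.toList.length : Int) - 1)).1

def versionCodeToValue (input : String) : Int :=
  if PySem.Str.isIn "." input then
    let verParts := ((PySem.Str.split? input ".").getD [])
    (verParts.foldl
      (fun (st : Int × Int) part => (st.1 + strToHexPort part * (2:Int) ^ ((10:Int) * st.2).toNat, st.2 - 1))
      (0, (verParts.length : Int) - 1)).1
  else 0  -- Python raises ValueError here; excluded by Pre_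

-- ===== PORT B =====
-- B uses the identical 0–b digit dict; shared as numA above.
def versionCodeToValue_alt (input : String) : Int :=
  if PySem.Str.isIn "." input then
    (((PySem.Str.split? input ".").getD [])).foldl
      (fun ret part => ret * 1024 + part.toList.foldl (fun p ch => p * 16 + numA ch) 0) 0
  else 0  -- Python raises ValueError here; excluded by Pre_

-- ===== PRECONDITION & SPEC =====
-- A raises ValueError when input has no '.' and KeyError on any character outside its 0–b digit dict; Pre_ excludes exactly those.
def Pre_versionCodeToValue (input : String) : Prop :=
  PySem.Str.isIn "." input = true ∧
  input.toList.all (fun c => c ∈ ['0','1','2','3','4','5','6','7','8','9','a','b','.']) = true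
instance (input : String) : Decidable (Pre_versionCodeToValue input) := by unfold Pre_versionCodeToValue; infer_instance
def pvWitness_versionCodeToValue : String := "1a.0b.9"

def Spec_versionCodeToValue (input : String) (out : Int) : Prop := out = versionCodeToValue_alt input
instance (input : String) (out : Int) : Decidable (Spec_versionCodeToValue input out) := by unfold Spec_versionCodeToValue; infer_instance

-- ===== CLAIM (what is proved, stated in full; the proofs are below) =====
def Claim_equal_versionCodeToValue : Prop := ∀ (input : String), Dom_versionCodeToValue input → Pre_versionCodeToValue input → Spec_versionCodeToValue input (versionCodeToValue input)

-- ===== LEMMAS AND PROOFS =====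

-- Horner step with a nonzero accumulator splits off the accumulator scaled by the base power.
theorem horner_shift (B : Int) (f : Char → Int) :
    ∀ (l : List Char) (a : Int),
      l.foldl (fun p ch => p * B + f ch) a
        = a * B ^ l.length + l.foldl (fun p ch => p * B + f ch) 0 := by
  intro l
  induction l with
  | nil => intro a; simp
  | cons x xs ih =>
      intro a
      simp only [List.foldl_cons, List.length_cons]
      rw [ih (a * B + f x), ih (0 * B + f x)]
      ring

-- A's inner positional-shift loop equals B's inner Horner fold.
theorem inner_eq : ∀ (l : List Char) (a : Int),
    (l.foldl (fun (st : Int × Int) ch => (st.1 + numA ch * (2:Int) ^ (st.2 * 4).toNat, st.2 - 1))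
        (a, (l.length : Int) - 1)).1
      = a + l.foldl (fun p ch => p * 16 + numA ch) 0 := by
  intro l
  induction l with
  | nil => intro a; simp
  | cons x xs ih =>
      intro a
      simp only [List.foldl_cons, List.length_cons]
      have h1 : ((xs.length : Int) + 1 - 1) = (xs.length : Int) := by ring
      have h2 : (((xs.length : Int)) * 4).toNat = 4 * xs.length := by
        omega
      rw [show ((xs.length + 1 : Nat) : Int) - 1 = (xs.length : Int) by push_cast; ring]
      rw [h2]
      rw [show ((xs.length : Int) - 1) = ((xs.length : Int) - 1) from rfl]
      rw [ih (a + numA x * (2:Int) ^ (4 * xs.length))]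
      rw [horner_shift 16 numA xs (0 * 16 + numA x)]
      have h16 : (2:Int) ^ (4 * xs.length) = 16 ^ xs.length := by
        rw [pow_mul]; norm_num
      rw [h16]; ring

-- A's outer positional-shift loop equals B's outer Horner fold.
theorem outer_eq : ∀ (l : List String) (a : Int),
    (l.foldl (fun (st : Int × Int) part => (st.1 + strToHexPort part * (2:Int) ^ ((10:Int) * st.2).toNat, st.2 - 1))
        (a, (l.length : Int) - 1)).1
      = a + l.foldl (fun ret part => ret * 1024 + part.toList.foldl (fun p ch => p * 16 + numA ch) 0) 0 := by
  intro l
  induction l with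
  | nil => intro a; simp
  | cons x xs ih =>
      intro a
      simp only [List.foldl_cons, List.length_cons]
      have h2 : ((10:Int) * (xs.length : Int)).toNat = 10 * xs.length := by omega
      rw [show ((xs.length + 1 : Nat) : Int) - 1 = (xs.length : Int) by push_cast; ring]
      rw [h2]
      rw [ih (a + strToHexPort x * (2:Int) ^ (10 * xs.length))]
      have hstr : strToHexPort x = x.toList.foldl (fun p ch => p * 16 + numA ch) 0 := by
        unfold strToHexPort
        rw [inner_eq x.toList 0]; ring
      set g := fun (ret : Int) (part : String) =>
        ret * 1024 + part.toList.foldl (fun p ch => p * 16 + numA ch) 0 with hg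
      have hsh : ∀ (ys : List String) (b : Int),
          ys.foldl g b = b * 1024 ^ ys.length + ys.foldl g 0 := by
        intro ys
        induction ys with
        | nil => intro b; simp
        | cons y yt iht =>
            intro b
            simp only [List.foldl_cons, List.length_cons, hg]
            rw [iht (b * 1024 + y.toList.foldl (fun p ch => p * 16 + numA ch) 0),
                iht (0 * 1024 + y.toList.foldl (fun p ch => p * 16 + numA ch) 0)]
            ring
      rw [hsh xs (g 0 x)]
      rw [hg, hstr]
      have : (2:Int) ^ (10 * xs.length) = 1024 ^ xs.length := by
        rw [pow_mul]; norm_num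
      rw [this]; ring

-- ===== VERDICT (by name: the statement is the Claim_ definition above) =====
theorem versionCodeToValue_spec : Claim_equal_versionCodeToValue := by
  intro input _ hpre
  unfold Spec_versionCodeToValue versionCodeToValue versionCodeToValue_alt
  rw [if_pos hpre.1, if_pos hpre.1]
  rw [outer_eq (((PySem.Str.split? input ".").getD [])) 0]
  ring
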